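-- pv_equiv track=rewrite | github.com/Binkmaster/cuneiform | cuneiform/geometry/laws.py | _isqrt_exact
-- ===== SOURCE A (Python) =====
-- def _isqrt_exact(n: int) -> int | None:
--     """Integer square root if n is a perfect square, else None."""
--     if n < 0:
--         return None
--     if n == 0:
--         return 0
--     # Newton's method for integer sqrt
--     x = n
--     y = (x + 1) // 2
--     while y < x:
--         x = y
--         y = (x + n // x) // 2
--     if x * x == n:
--         return x
--     return None
-- ===== SOURCE B (Python) =====
-- def _isqrt_exact(n: int) -> int | None:
--     """Integer square root if n is a perfect square, else None.
--
--     Binary search for the largest x with x*x <= n (instead of Newton's method).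
--     """
--     if n < 0:
--         return None
--     if n == 0:
--         return 0
--     lo, hi = 1, n
--     while lo < hi:
--         mid = (lo + hi + 1) // 2
--         if mid * mid <= n:
--             lo = mid
--         else:
--             hi = mid - 1
--     return lo if lo * lo == n else None
-- ===== Notes on version B (the rewrite author's own statement) =====
-- stated objective: alternative
-- what changed: Replaced Newton's integer fixed-point iteration with a monotone binary search over [1, n] for the largest x with x*x <= n, keeping the final exact-square check.
import Mathlib
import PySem

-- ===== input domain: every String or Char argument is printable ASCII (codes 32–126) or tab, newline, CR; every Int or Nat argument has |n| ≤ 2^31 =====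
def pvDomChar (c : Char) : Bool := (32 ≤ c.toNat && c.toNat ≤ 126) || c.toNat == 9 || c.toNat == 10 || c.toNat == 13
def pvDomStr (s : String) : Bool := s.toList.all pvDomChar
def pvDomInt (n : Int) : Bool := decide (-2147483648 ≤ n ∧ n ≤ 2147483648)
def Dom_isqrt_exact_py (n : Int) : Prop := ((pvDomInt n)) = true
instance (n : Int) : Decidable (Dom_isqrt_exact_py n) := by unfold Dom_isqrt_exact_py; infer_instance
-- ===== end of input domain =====

-- B replaces A's Newton iteration by a binary search for the largest x with x*x ≤ n
-- (a genuinely different algorithm of similar cost; return values proved identical on all inputs).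

-- ===== PORT A =====
-- A's `while y < x` loop; the fuel argument only makes the recursion structural
-- (x strictly decreases and stays ≥ 1 on every entered iteration, so fuel n.toNat is never exhausted).
def pvNewtonLoop (fuel : Nat) (n x y : Int) : Int :=
  match fuel with
  | 0 => x
  | f + 1 =>
    if y < x then
      pvNewtonLoop f n y (PySem.Int.floordiv (y + PySem.Int.floordiv n y) 2)
    else x

def isqrt_exact_py (n : Int) : Option Int :=
  if n < 0 then none
  else if n = 0 then some 0
  else
    let x := n
    let y := PySem.Int.floordiv (x + 1) 2
    let x := pvNewtonLoop n.toNat n x y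
    if x * x = n then some x else none

-- ===== PORT B =====
-- B's `while lo < hi` loop; fuel n.toNat only makes the recursion structural (hi - lo shrinks each step).
def pvBsLoop (fuel : Nat) (n lo hi : Int) : Int :=
  match fuel with
  | 0 => lo
  | f + 1 =>
    if lo < hi then
      let mid := PySem.Int.floordiv (lo + hi + 1) 2
      if mid * mid ≤ n then pvBsLoop f n mid hi
      else pvBsLoop f n lo (mid - 1)
    else lo

def isqrt_exact_py_alt (n : Int) : Option Int :=
  if n < 0 then none
  else if n = 0 then some 0
  else
    let lo := pvBsLoop n.toNat n 1 n
    if lo * lo = n then some lo else none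

-- ===== PRECONDITION & SPEC =====
def Spec_isqrt_exact_py (n : Int) (out : Option Int) : Prop := out = isqrt_exact_py_alt n
instance (n : Int) (out : Option Int) : Decidable (Spec_isqrt_exact_py n out) := by unfold Spec_isqrt_exact_py; infer_instance

-- ===== CLAIM (what is proved, stated in full; the proofs are below) =====
def Claim_equal_isqrt_exact_py : Prop := ∀ (n : Int), Dom_isqrt_exact_py n → Spec_isqrt_exact_py n (isqrt_exact_py n)

-- ===== LEMMAS AND PROOFS =====

/-- The true integer square root, used only in the proofs. -/
def pvS (n : Int) : Int := ((n.toNat.sqrt : Nat) : Int)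

theorem pvS_bounds (n : Int) (hn : 1 ≤ n) :
    1 ≤ pvS n ∧ pvS n * pvS n ≤ n ∧ n < (pvS n + 1) * (pvS n + 1) := by
  have h1 : (n.toNat.sqrt) ^ 2 ≤ n.toNat := Nat.sqrt_le' _
  have h2 : n.toNat < (n.toNat.sqrt).succ ^ 2 := Nat.lt_succ_sqrt' _
  have hc : ((n.toNat : Int)) = n := Int.toNat_of_nonneg (by omega)
  have hs1 : 1 ≤ n.toNat.sqrt := by
    have : 1 ≤ n.toNat := by omega
    exact Nat.one_le_iff_ne_zero.mpr (by
      intro h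
      have := Nat.sqrt_eq_zero.mp h
      omega)
  refine ⟨by unfold pvS; exact_mod_cast hs1, ?_, ?_⟩
  · have : ((n.toNat.sqrt * n.toNat.sqrt : Nat) : Int) ≤ ((n.toNat : Nat) : Int) := by
      exact_mod_cast (by nlinarith [h1] : n.toNat.sqrt * n.toNat.sqrt ≤ n.toNat)
    simpa [pvS, hc] using this
  · have : ((n.toNat : Nat) : Int) < (((n.toNat.sqrt + 1) * (n.toNat.sqrt + 1) : Nat) : Int) := by
      exact_mod_cast (by nlinarith [h2] : n.toNat < (n.toNat.sqrt + 1) * (n.toNat.sqrt + 1))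
    rw [hc] at this
    push_cast at this
    simpa [pvS] using this

theorem pvS_unique (n a : Int) (hn : 1 ≤ n) (h1 : a * a ≤ n) (h2 : n < (a + 1) * (a + 1)) :
    a = pvS n := by
  obtain ⟨hs1, hs2, hs3⟩ := pvS_bounds n hn
  by_contra hne
  rcases lt_or_gt_of_ne hne with h | h
  · nlinarith
  · nlinarith

/-- A Newton step from any x ≥ 1 lands at or above the true root. -/
theorem pvNewton_step_ge (n x : Int) (hx : 1 ≤ x) (hn : 1 ≤ n) :
    pvS n ≤ PySem.Int.floordiv (x + PySem.Int.floordiv n x) 2 := by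
  obtain ⟨hs1, hs2, _⟩ := pvS_bounds n hn
  rw [PySem.Int.le_floordiv_iff_mul_le (by omega)]
  have h1 : (2 * pvS n - x) ≤ PySem.Int.floordiv n x := by
    rw [PySem.Int.le_floordiv_iff_mul_le (by omega)]
    nlinarith [sq_nonneg (pvS n - x)]
  nlinarith

/-- On loop exit (x ≤ y) with x ≥ 1 we have x² ≤ n. -/
theorem pvNewton_exit (n x : Int) (hx : 1 ≤ x)
    (h : x ≤ PySem.Int.floordiv (x + PySem.Int.floordiv n x) 2) : x * x ≤ n := by
  rw [PySem.Int.le_floordiv_iff_mul_le (by omega)] at h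
  have h2 : x ≤ PySem.Int.floordiv n x := by omega
  rw [PySem.Int.le_floordiv_iff_mul_le (by omega)] at h2
  linarith

theorem pvNewtonLoop_eq (n : Int) (hn : 1 ≤ n) :
    ∀ (f : Nat) (x : Int), 1 ≤ x → pvS n ≤ x → (x - pvS n).toNat ≤ f →
      pvNewtonLoop f n x (PySem.Int.floordiv (x + PySem.Int.floordiv n x) 2) = pvS n := by
  intro f
  induction f with
  | zero =>
    intro x hx hsx hf
    have : x = pvS n := by omega
    simpa [pvNewtonLoop] using this
  | succ f ih =>
    intro x hx hsx hf
    set y := PySem.Int.floordiv (x + PySem.Int.floordiv n x) 2 with hy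
    by_cases hc : y < x
    · have hsy : pvS n ≤ y := pvNewton_step_ge n x hx hn
      have hy1 : 1 ≤ y := by
        obtain ⟨hs1, _, _⟩ := pvS_bounds n hn
        omega
      rw [pvNewtonLoop, if_pos hc]
      exact ih y hy1 hsy (by omega)
    · push Not at hc
      have hxx : x * x ≤ n := pvNewton_exit n x hx (hy ▸ hc)
      obtain ⟨_, _, hs3⟩ := pvS_bounds n hn
      have : x = pvS n := by
        apply pvS_unique n x hn hxx
        nlinarith
      rw [pvNewtonLoop, if_neg (not_lt.mpr hc)]
      exact this

theorem pvBsLoop_eq (n : Int) (hn : 1 ≤ n) :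
    ∀ (f : Nat) (lo hi : Int), 1 ≤ lo → lo ≤ hi → lo * lo ≤ n → n < (hi + 1) * (hi + 1) →
      (hi - lo).toNat ≤ f → pvBsLoop f n lo hi = pvS n := by
  intro f
  induction f with
  | zero =>
    intro lo hi hlo hlh hlon hhin hf
    have : lo = hi := by omega
    subst this
    simpa [pvBsLoop] using pvS_unique n lo hn hlon hhin
  | succ f ih =>
    intro lo hi hlo hlh hlon hhin hf
    by_cases hc : lo < hi
    · set mid := PySem.Int.floordiv (lo + hi + 1) 2 with hmid
      have hmid_lo : lo + 1 ≤ mid := by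
        rw [hmid, PySem.Int.le_floordiv_iff_mul_le (by omega)]; omega
      have hmid_hi : mid ≤ hi := by
        have : mid < hi + 1 := by
          rw [hmid, PySem.Int.floordiv_lt_iff_lt_mul (by omega)]; omega
        omega
      by_cases hm : mid * mid ≤ n
      · rw [pvBsLoop, if_pos hc]
        simp only [← hmid, if_pos hm]
        exact ih mid hi (by omega) hmid_hi hm hhin (by omega)
      · rw [pvBsLoop, if_pos hc]
        simp only [← hmid, if_neg hm]
        have : n < (mid - 1 + 1) * (mid - 1 + 1) := by
          have := not_le.mp hm
          nlinarith
        exact ih lo (mid - 1) hlo (by omega) hlon this (by omega)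
    · push Not at hc
      have : lo = hi := by omega
      subst this
      simpa [pvBsLoop, not_lt.mpr (le_refl lo)] using pvS_unique n lo hn hlon hhin

theorem pvFloordiv_self (n : Int) (hn : 1 ≤ n) : PySem.Int.floordiv n n = 1 := by
  rw [PySem.Int.floordiv_eq_iff_of_pos (by omega)]
  constructor <;> nlinarith

theorem pvNewton_result (n : Int) (hn : 1 ≤ n) :
    pvNewtonLoop n.toNat n n (PySem.Int.floordiv (n + 1) 2) = pvS n := by
  have h1 : PySem.Int.floordiv (n + 1) 2
      = PySem.Int.floordiv (n + PySem.Int.floordiv n n) 2 := by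
    rw [pvFloordiv_self n hn]
  rw [h1]
  obtain ⟨hs1, hs2, _⟩ := pvS_bounds n hn
  have hsn : pvS n ≤ n := by nlinarith
  exact pvNewtonLoop_eq n hn n.toNat n hn hsn (by omega)

theorem pvBs_result (n : Int) (hn : 1 ≤ n) :
    pvBsLoop n.toNat n 1 n = pvS n := by
  apply pvBsLoop_eq n hn n.toNat 1 n (by omega) hn (by nlinarith) (by nlinarith) (by omega)

-- ===== VERDICT (by name: the statement is the Claim_ definition above) =====
theorem isqrt_exact_py_spec : Claim_equal_isqrt_exact_py := by
  intro n _
  unfold Spec_isqrt_exact_py isqrt_exact_py isqrt_exact_py_alt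
  by_cases h1 : n < 0
  · simp [h1]
  · by_cases h2 : n = 0
    · simp [h2]
    · have hn : 1 ≤ n := by omega
      simp only [if_neg h1, if_neg h2]
      rw [pvNewton_result n hn, pvBs_result n hn]
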